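-- pv_equiv track=rewrite | github.com/mrbartrns/algorithm-and-structure | programmers/lv4_review/p15_1.py | solution
-- ===== SOURCE A (Python) =====
-- class Node:
--     def __init__(self, a):
--         self.char = a
--         self.cnt = 0
--         self.next = []
--
--     def __str__(self):
--         return self.char
--
-- def dfs(node, word, idx):
--     node.cnt += 1
--     if idx == len(word):
--         return
--
--     nxt_node = None
--     for nxt in node.next:
--         if nxt.char == word[idx]:
--             nxt_node = nxt
--             break
--     if not nxt_node:
--         nxt_node = Node(word[idx])
--         node.next.append(nxt_node)
--     dfs(nxt_node, word, idx + 1)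
--
-- def get_count(node):
--     s = node.cnt
--     if node.cnt > 1:
--         for nxt in node.next:
--             s += get_count(nxt)
--     return s
--
-- def solution(words):
--     alphabets = []
--     answer = 0
--     for i in range(26):
--         alphabets.append(Node(chr(i + ord('a'))))
--
--     for word in words:
--         node = alphabets[ord(word[0]) - ord('a')]
--         dfs(node, word, 1)
--
--     for i in range(26):
--         answer += get_count(alphabets[i])
--
--     return answer
-- ===== SOURCE B (Python) =====
-- def _keystrokes(words, w):
--     # first prefix length at which w's prefix is unique among words, capped at len(w)
--     for d in range(1, len(w)):
--         if sum(1 for v in words if v[:d] == w[:d]) == 1: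
--             return d
--     return len(w)
--
-- def solution(words):
--     return sum(_keystrokes(words, w) for w in words)
-- ===== Notes on version B (the rewrite author's own statement) =====
-- stated objective: simpler
-- what changed: A builds a mutable 26-root trie with per-node visit counters and sums them by recursive descent; B computes, for each word independently, the first prefix length at which that prefix is unique among the words (capped at the word's length) by direct prefix counting, and sums these.
-- outside the precondition, e.g. on solution(['Gx', 'a']): A returns 3, B returns 2
import Mathlib
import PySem

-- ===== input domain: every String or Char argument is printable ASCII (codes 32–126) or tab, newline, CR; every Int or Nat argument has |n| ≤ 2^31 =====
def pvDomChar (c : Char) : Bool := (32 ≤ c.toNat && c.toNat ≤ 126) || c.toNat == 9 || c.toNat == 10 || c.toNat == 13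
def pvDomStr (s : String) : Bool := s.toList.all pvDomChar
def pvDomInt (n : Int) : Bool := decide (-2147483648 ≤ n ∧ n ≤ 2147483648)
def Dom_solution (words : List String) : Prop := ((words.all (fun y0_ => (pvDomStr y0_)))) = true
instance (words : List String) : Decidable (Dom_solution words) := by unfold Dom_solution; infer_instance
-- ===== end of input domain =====

-- B replaces A's mutable trie (build + recursive cnt summation) by a direct per-word scan for the
-- first prefix length that is unique among the words; same totals on the stated domain.

-- ===== PORT A =====
-- Node(char, cnt, next): a mutual pair instead of a nested inductive.
mutual
inductive PNode : Type
  | mk : Char → Int → PForest → PNode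
inductive PForest : Type
  | nil : PForest
  | cons : PNode → PForest → PForest
end

def PNode.char : PNode → Char
  | .mk c _ _ => c

-- the `for nxt in node.next` scan of dfs: find the child with the wanted char and apply the
-- continuation k (= the recursive dfs call) to it, or append a fresh node (Python .append).
def scanF (k : PNode → PNode) (ch : Char) : PForest → PForest
  | .nil => .cons (k (.mk ch 0 .nil)) .nil
  | .cons n f => if n.char = ch then .cons (k n) f else .cons n (scanF k ch f)

-- dfs(node, word, idx) with rest = word[idx:]: node.cnt += 1, stop at the word's end, else
-- descend into (or create) the child for the next character.
def dfsN : List Char → PNode → PNode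
  | [], .mk c cnt f => .mk c (cnt + 1) f
  | ch :: rest, .mk c cnt f => .mk c (cnt + 1) (scanF (dfsN rest) ch f)

-- get_count(node): s = cnt; if cnt > 1, add the children's counts.
mutual
def getCountN : PNode → Int
  | .mk _ cnt f => cnt + (if cnt > 1 then getCountF f else 0)
def getCountF : PForest → Int
  | .nil => 0
  | .cons n f => getCountN n + getCountF f
end

-- node = alphabets[ord(word[0]) - ord('a')]; dfs(node, word, 1); dfs's in-place mutation becomes
-- writing the updated node back at its index.  Where Python raises IndexError (empty word) or
-- wraps/overflows the index (first char not 'a'..'z') — all outside Pre_ — the list is unchanged.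
def insertWord (alph : List PNode) (w : String) : List PNode :=
  match w.toList with
  | [] => alph
  | c :: rest =>
      -- i = ord(word[0]) - ord('a') indexes the 26-entry list: Python wraps a negative index
      -- from the end and raises IndexError out of range (the raising inputs are outside Pre_,
      -- where the list is returned unchanged)
      if PySem.Raise.InRange alph.length ((c.toNat : Int) - 97) then
        PySem.List.pySetD alph ((c.toNat : Int) - 97)
          (dfsN rest (PySem.List.pyGetD alph ((c.toNat : Int) - 97) (.mk 'a' 0 .nil)))
      else alph

def solution (words : List String) : Int :=
  -- for i in range(26): alphabets.append(Node(chr(i + ord('a'))))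
  let alph0 : List PNode :=
    (List.range 26).foldl (fun l i => l ++ [PNode.mk (Char.ofNat (i + 97)) 0 .nil]) []
  -- for word in words: dfs into its bucket
  let alph := words.foldl insertWord alph0
  -- for i in range(26): answer += get_count(alphabets[i])
  (List.range 26).foldl (fun s i => s + getCountN (alph.getD i (.mk 'a' 0 .nil))) 0

-- ===== PORT B =====
-- sum(1 for v in words if v[:d] == w[:d]); the slice v[:d] (d ≥ 0) is List.take d.
def bCount (words : List String) (w : List Char) (d : Nat) : Int :=
  words.foldl (fun s v => if v.toList.take d = w.take d then s + 1 else s) 0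

-- for d in range(1, len(w)): if <count> == 1: return d;  return len(w)
def ksAux (words : List String) (w : List Char) : List Nat → Int
  | [] => (w.length : Int)
  | d :: ds => if bCount words w d = 1 then (d : Int) else ksAux words w ds

def solution_alt (words : List String) : Int :=
  (words.map (fun w => ksAux words w.toList (List.range' 1 (w.toList.length - 1)))).sum

-- ===== PRECONDITION & SPEC =====
-- Pre_ restricts to the problem's intended domain — nonempty words starting with a lowercase
-- letter: outside it A either raises IndexError (index ord(word[0]) - 97 out of range even after
-- negative wraparound) or, for first characters 'G'..'`', negative indexing files the word under
-- another letter's slot of the 26-entry table, a value tied to that table which B does not reproduce.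
def Pre_solution (words : List String) : Prop :=
  ∀ w ∈ words, w.toList ≠ [] ∧ 97 ≤ ((w.toList.headD 'a').toNat) ∧ ((w.toList.headD 'a').toNat) ≤ 122
instance (words : List String) : Decidable (Pre_solution words) := by
  unfold Pre_solution; infer_instance
def pvWitness_solution : List String := ["go", "gone", "guild", "go"]

def Spec_solution (words : List String) (out : Int) : Prop := out = solution_alt words
instance (words : List String) (out : Int) : Decidable (Spec_solution words out) := by
  unfold Spec_solution; infer_instance

-- ===== CLAIM (what is proved, stated in full; the proofs are below) =====
def Claim_equal_solution : Prop :=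
  ∀ (words : List String), Dom_solution words → Pre_solution words →
    Spec_solution words (solution words)
-- ===== LEMMAS AND PROOFS =====

-- semantic model: the multiset of word suffixes a node is responsible for
def sel (ms : List (List Char)) (c : Char) : List (List Char) :=
  ms.filterMap (fun w => match w with | [] => none | h :: t => if h = c then some t else none)

-- keystrokes contributed by suffix t when its node's multiset is ms
def steps : List Char → List (List Char) → Int
  | [], _ => 1
  | c :: t, ms => 1 + (if 1 < ms.length then steps t (sel ms c) else 0)

def charsF : PForest → List Char
  | .nil => []
  | .cons n f => n.char :: charsF f

def childrenF : PForest → List PNode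
  | .nil => []
  | .cons n f => n :: childrenF f

-- invariant: node with count cnt and children f represents the suffix multiset ms
inductive TrieInv : PNode → List (List Char) → Prop
  | mk {c : Char} {cnt : Int} {f : PForest} {ms : List (List Char)} :
      cnt = (ms.length : Int) →
      (charsF f).Nodup →
      (∀ ch, ch ∈ charsF f ↔ ∃ w ∈ ms, w.head? = some ch) →
      (∀ n ∈ childrenF f, TrieInv n (sel ms n.char)) →
      TrieInv (.mk c cnt f) ms

-- suffixes of the words filed under root bucket j (insertion order as produced by the fold)
def rootB (l : List (List Char)) (j : Nat) : List (List Char) :=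
  l.filterMap (fun v => match v with | [] => none | c :: t => if c.toNat - 97 = j then some t else none)

-- suffixes after d characters of the words sharing v's first d characters
def msAt (ws : List (List Char)) (d : Nat) (v : List Char) : List (List Char) :=
  ws.filterMap (fun u => if u.take d = v.take d then some (u.drop d) else none)

def dfltN : PNode := .mk 'a' 0 .nil

-- ---- generic sum regrouping ----
theorem sum_if_mem {β : Type} [DecidableEq β] (js : List β) (hnd : js.Nodup) (b0 : β)
    (hb : b0 ∈ js) (x : Int) (f : β → Int) :
    (js.map (fun b => (if b0 = b then x else 0) + f b)).sum = x + (js.map f).sum := by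
  induction js with
  | nil => cases hb
  | cons b js ih =>
    rcases List.mem_cons.mp hb with rfl | hb'
    · have : ∀ b' ∈ js, (if b0 = b' then x else 0) + f b' = f b' := by
        intro b' hb'
        have : b0 ≠ b' := fun h => (List.nodup_cons.mp hnd).1 (h ▸ hb')
        simp [this]
      simp only [List.map_cons, List.sum_cons, List.map_congr_left this]
      ring_nf
      simp
      ring
    · have hne : b0 ≠ b := fun h => (List.nodup_cons.mp hnd).1 (h ▸ hb')
      simp only [List.map_cons, List.sum_cons, if_neg hne,
        ih (List.nodup_cons.mp hnd).2 hb']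
      ring

theorem regroup {α β γ : Type} [DecidableEq β] (F : β → γ → Int) (pick : α → Option (β × γ))
    (js : List β) (hnd : js.Nodup) :
    ∀ ms : List α, (∀ a ∈ ms, ∀ p, pick a = some p → p.1 ∈ js) →
    (js.map (fun b =>
      ((ms.filterMap (fun a => (pick a).bind
        (fun p => if p.1 = b then some p.2 else none))).map (F b)).sum)).sum
    = (ms.filterMap (fun a => (pick a).map (fun p => F p.1 p.2))).sum := by
  intro ms
  induction ms with
  | nil => intro _; simp
  | cons a ms ih =>
    intro hcov
    have hcov' : ∀ x ∈ ms, ∀ p, pick x = some p → p.1 ∈ js := fun x hx => hcov x (List.mem_cons_of_mem _ hx)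
    rcases hpick : pick a with _ | ⟨b0, g⟩
    · simpa [hpick] using ih hcov'
    · have hb0 : b0 ∈ js := hcov a (List.mem_cons_self) (b0, g) hpick
      have : ∀ b ∈ js,
          (((a :: ms).filterMap (fun a => (pick a).bind
            (fun p => if p.1 = b then some p.2 else none))).map (F b)).sum
          = (if b0 = b then F b0 g else 0) +
            ((ms.filterMap (fun a => (pick a).bind
            (fun p => if p.1 = b then some p.2 else none))).map (F b)).sum := by
        intro b _
        by_cases hbb : b0 = b
        · subst hbb; simp [hpick]
        · simp [hpick, hbb]
      rw [List.map_congr_left this, sum_if_mem js hnd b0 hb0, ih hcov']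
      simp [hpick]

theorem regroup' {α β γ : Type} [DecidableEq β] (F : β → γ → Int) (pick : α → Option (β × γ))
    (js : List β) (hnd : js.Nodup) (ms : List α)
    (hcov : ∀ a ∈ ms, ∀ p, pick a = some p → p.1 ∈ js)
    (bucket : β → List γ)
    (hb : ∀ b, bucket b = ms.filterMap (fun a => (pick a).bind
        (fun p => if p.1 = b then some p.2 else none))) :
    (js.map (fun b => ((bucket b).map (F b)).sum)).sum
    = (ms.filterMap (fun a => (pick a).map (fun p => F p.1 p.2))).sum := by
  have := regroup F pick js hnd ms hcov
  rw [← this]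
  refine congrArg _ (List.map_congr_left ?_)
  intro b _
  rw [hb b]

def pickHT : List Char → Option (Char × List Char)
  | [] => none
  | c :: t => some (c, t)

def pickRoot : List Char → Option (Nat × List Char)
  | [] => none
  | c :: t => some (c.toNat - 97, t)

theorem sum_filterMap_pick {β : Type} (pk : List Char → Option (β × List Char))
    (G : β → List Char → Int) : ∀ (l : List (List Char)),
    (l.filterMap (fun a => (pk a).map (fun p => G p.1 p.2))).sum
    = (l.map (fun w => ((pk w).map (fun p => G p.1 p.2)).getD 0)).sum
  | [] => rfl
  | w :: tl => by
    rcases h : pk w with _ | ⟨b, g⟩ <;>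
      simp [h, sum_filterMap_pick pk G tl]

-- ---- steps facts ----
theorem steps_perm {ms₁ ms₂ : List (List Char)} (h : ms₁.Perm ms₂) (t : List Char) :
    steps t ms₁ = steps t ms₂ := by
  induction t generalizing ms₁ ms₂ with
  | nil => rfl
  | cons c t ih =>
    have hsel : (sel ms₁ c).Perm (sel ms₂ c) := h.filterMap _
    simp only [steps, h.length_eq, ih hsel]

-- ---- dfs preserves the invariant ----
theorem char_dfsN (rest : List Char) (n : PNode) : (dfsN rest n).char = n.char := by
  cases rest <;> cases n <;> rfl

theorem char_mem_charsF : ∀ (f : PForest) (n : PNode), n ∈ childrenF f → n.char ∈ charsF f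
  | .nil, n, h => by cases h
  | .cons n0 f, n, h => by
    rcases List.mem_cons.mp h with rfl | h'
    · exact List.mem_cons_self
    · exact List.mem_cons_of_mem _ (char_mem_charsF f n h')

theorem charsF_scanF (k : PNode → PNode) (hk : ∀ n, (k n).char = n.char) (ch : Char) :
    ∀ (f : PForest), charsF (scanF k ch f) = if ch ∈ charsF f then charsF f else charsF f ++ [ch]
  | .nil => by
      have : charsF (scanF k ch .nil) = [(k (.mk ch 0 .nil)).char] := rfl
      rw [this, hk]
      simp [charsF, PNode.char]
  | .cons n0 f => by
    by_cases hc : n0.char = ch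
    · simp [scanF, hc, charsF, hk, List.mem_cons]
    · simp only [scanF, if_neg hc, charsF, charsF_scanF k hk ch f]
      by_cases hm : ch ∈ charsF f
      · simp [hm, Ne.symm hc]
      · simp [hm, Ne.symm hc]

theorem sel_cons_ne (ms : List (List Char)) (c c' : Char) (t : List Char) (h : c ≠ c') :
    sel ((c :: t) :: ms) c' = sel ms c' := by
  simp [sel, h]

theorem sel_cons_eq (ms : List (List Char)) (c : Char) (t : List Char) :
    sel ((c :: t) :: ms) c = t :: sel ms c := by
  simp [sel]

theorem sel_nil_cons (ms : List (List Char)) (c : Char) :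
    sel ([] :: ms) c = sel ms c := by
  simp [sel]

theorem sel_eq_nil (ms : List (List Char)) (c : Char)
    (h : ∀ w ∈ ms, w.head? ≠ some c) : sel ms c = [] := by
  rw [sel, List.filterMap_eq_nil_iff]
  intro w hw
  cases w with
  | nil => simp
  | cons h' t =>
    have := h _ hw
    simp only [List.head?_cons, ne_eq, Option.some.injEq] at this
    simp [this]

theorem trieInv_empty_node (ch : Char) : TrieInv (.mk ch 0 .nil) [] := by
  refine TrieInv.mk (by simp) (by simp [charsF]) ?_ ?_
  · intro c; simp [charsF]
  · intro n hn; simp [childrenF] at hn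

theorem scan_children_inv (rest' : List Char) (ch : Char)
    (hIH : ∀ n ms, TrieInv n ms → TrieInv (dfsN rest' n) (rest' :: ms)) :
    ∀ (f : PForest) (ms : List (List Char)),
    (charsF f).Nodup →
    (∀ n ∈ childrenF f, TrieInv n (sel ms n.char)) →
    (ch ∉ charsF f → sel ms ch = []) →
    ∀ n ∈ childrenF (scanF (dfsN rest') ch f), TrieInv n (sel ((ch :: rest') :: ms) n.char)
  | .nil, ms, _, _, hch, n, hn => by
    simp only [scanF, childrenF, List.mem_cons, List.not_mem_nil, or_false] at hn
    subst hn
    rw [char_dfsN, PNode.char, sel_cons_eq,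
      hch (by simp [charsF])]
    exact hIH _ _ (trieInv_empty_node ch)
  | .cons n0 f, ms, hnd, hinv, hch, n, hn => by
    by_cases hc : n0.char = ch
    · simp only [scanF, if_pos hc, childrenF, List.mem_cons] at hn
      rcases hn with rfl | hn'
      · rw [char_dfsN, hc, sel_cons_eq]
        exact hIH _ _ (hc ▸ hinv n0 (by simp [childrenF]))
      · have hmem := char_mem_charsF f n hn'
        have hne : ch ≠ n.char := by
          intro h
          exact (List.nodup_cons.mp (by simpa [charsF] using hnd)).1 (hc ▸ h ▸ hmem)
        rw [sel_cons_ne _ _ _ _ hne]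
        exact hinv n (by simp [childrenF, hn'])
    · simp only [scanF, if_neg hc, childrenF, List.mem_cons] at hn
      rcases hn with rfl | hn'
      · rw [sel_cons_ne _ _ _ _ (fun h => hc h.symm)]
        exact hinv n (by simp [childrenF])
      · have hnd' : (charsF f).Nodup := (List.nodup_cons.mp (by simpa [charsF] using hnd)).2
        have hinv' : ∀ m ∈ childrenF f, TrieInv m (sel ms m.char) := fun m hm =>
          hinv m (by simp [childrenF, hm])
        have hch' : ch ∉ charsF f → sel ms ch = [] := by
          intro hno
          exact hch (by simp [charsF, List.mem_cons]; exact ⟨fun h => hc h.symm, hno⟩)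
        exact scan_children_inv rest' ch hIH f ms hnd' hinv' hch' n hn'

theorem inv_dfs : ∀ (rest : List Char) (n : PNode) (ms : List (List Char)),
    TrieInv n ms → TrieInv (dfsN rest n) (rest :: ms) := by
  intro rest
  induction rest with
  | nil =>
    intro n ms h
    cases h with
    | @mk c cnt f ms h1 h2 h3 h4 =>
      simp only [dfsN]
      refine TrieInv.mk ?_ h2 ?_ ?_
      · rw [h1]; push_cast [List.length_cons]; ring
      · intro ch
        rw [h3 ch]
        simp
      · intro n hn
        rw [sel_nil_cons]
        exact h4 n hn
  | cons ch rest ih =>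
    intro n ms h
    cases h with
    | @mk c cnt f ms h1 h2 h3 h4 =>
      simp only [dfsN]
      have hk : ∀ n, (dfsN rest n).char = n.char := char_dfsN rest
      have hchars := charsF_scanF (dfsN rest) hk ch f
      refine TrieInv.mk ?_ ?_ ?_ ?_
      · rw [h1]; push_cast [List.length_cons]; ring
      · rw [hchars]
        by_cases hm : ch ∈ charsF f
        · simpa [hm] using h2
        · simp only [if_neg hm]
          exact List.Nodup.append h2 (by simp) (by simp [hm])
      · intro c'
        rw [hchars]
        by_cases hm : ch ∈ charsF f
        · simp only [if_pos hm]
          constructor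
          · intro hc'
            obtain ⟨w, hw, hhw⟩ := (h3 c').mp hc'
            exact ⟨w, by simp [hw], hhw⟩
          · rintro ⟨w, hw, hhw⟩
            rcases List.mem_cons.mp hw with rfl | hw'
            · simp only [List.head?_cons, Option.some.injEq] at hhw
              exact hhw ▸ hm
            · exact (h3 c').mpr ⟨w, hw', hhw⟩
        · simp only [if_neg hm, List.mem_append, List.mem_singleton]
          constructor
          · rintro (hc' | heq)
            · obtain ⟨w, hw, hhw⟩ := (h3 c').mp hc'
              exact ⟨w, by simp [hw], hhw⟩
            · exact ⟨ch :: rest, by simp, by simp [heq]⟩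
          · rintro ⟨w, hw, hhw⟩
            rcases List.mem_cons.mp hw with rfl | hw'
            · simp only [List.head?_cons, Option.some.injEq] at hhw
              right; exact hhw.symm
            · left; exact (h3 c').mpr ⟨w, hw', hhw⟩
      · refine scan_children_inv rest ch ih f ms h2 h4 ?_
        intro hno
        refine sel_eq_nil ms ch ?_
        intro w hw hcontra
        exact hno ((h3 ch).mpr ⟨w, hw, hcontra⟩)

-- ---- get_count under the invariant ----
theorem getCountF_children : ∀ (f : PForest), getCountF f = ((childrenF f).map getCountN).sum
  | .nil => rfl
  | .cons n f => by simp [getCountF, childrenF, getCountF_children f]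

theorem charsF_eq_map : ∀ (f : PForest), charsF f = (childrenF f).map PNode.char
  | .nil => rfl
  | .cons n f => by simp [charsF, childrenF, charsF_eq_map f]

theorem getCount_inv {n : PNode} {ms : List (List Char)} (h : TrieInv n ms) :
    getCountN n = (ms.map (fun t => steps t ms)).sum := by
  induction h with
  | @mk c cnt f ms h1 h2 h3 h4 ih =>
    simp only [getCountN]
    rw [h1]
    by_cases hlen : 1 < ms.length
    · rw [if_pos (by exact_mod_cast hlen), getCountF_children,
        List.map_congr_left (fun n hn => ih n hn)]
      have hmm : ((childrenF f).map (fun n =>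
          ((sel ms n.char).map (fun t => steps t (sel ms n.char))).sum)).sum
        = ((charsF f).map (fun b =>
          ((sel ms b).map (fun t => steps t (sel ms b))).sum)).sum := by
        rw [charsF_eq_map f, List.map_map]; rfl
      rw [hmm]
      have hbucket : ∀ b : Char, sel ms b = ms.filterMap (fun a =>
          (pickHT a).bind (fun p => if p.1 = b then some p.2 else none)) := by
        intro b
        unfold sel
        congr 1
        funext w
        cases w <;> rfl
      have hcov : ∀ a ∈ ms, ∀ p : Char × List Char, pickHT a = some p → p.1 ∈ charsF f := by
        intro a ha p hp
        cases a with
        | nil => cases hp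
        | cons c' t =>
          simp only [pickHT, Option.some.injEq] at hp
          subst hp
          exact (h3 c').mpr ⟨c' :: t, ha, rfl⟩
      rw [regroup' (fun b g => steps g (sel ms b)) pickHT (charsF f) h2 ms hcov (sel ms) hbucket,
        sum_filterMap_pick pickHT (fun b g => steps g (sel ms b)) ms]
      have hsteps : ∀ w ∈ ms, steps w ms
          = 1 + ((pickHT w).map (fun p => steps p.2 (sel ms p.1))).getD 0 := by
        intro w _
        cases w with
        | nil => simp [steps, pickHT]
        | cons c' t => simp [steps, pickHT, if_pos hlen]
      rw [List.map_congr_left hsteps, PySem.List.sum_map_add_int,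
        PySem.List.sum_map_const_int]
      ring
    · rw [if_neg (by exact_mod_cast hlen)]
      have hsteps : ∀ w ∈ ms, steps w ms = (fun _ => (1:Int)) w := by
        intro w _
        cases w with
        | nil => simp [steps]
        | cons c' t => simp [steps, hlen]
      rw [List.map_congr_left hsteps, PySem.List.sum_map_const_int]
      ring

-- ---- the fold over words builds invariant tries ----
theorem fold_inv : ∀ (ws : List String) (alph : List PNode) (B : Nat → List (List Char)),
    alph.length = 26 →
    (∀ w ∈ ws, w.toList ≠ [] ∧ 97 ≤ ((w.toList.headD 'a').toNat) ∧ ((w.toList.headD 'a').toNat) ≤ 122) →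
    (∀ j, j < 26 → TrieInv (alph.getD j dfltN) (B j)) →
    (ws.foldl insertWord alph).length = 26 ∧
    ∀ j, j < 26 → TrieInv ((ws.foldl insertWord alph).getD j dfltN)
      (rootB ((ws.map String.toList).reverse) j ++ B j) := by
  intro ws
  induction ws with
  | nil =>
    intro alph B hlen _ hinv
    refine ⟨hlen, ?_⟩
    intro j hj
    simpa [rootB] using hinv j hj
  | cons w tl ih =>
    intro alph B hlen hpre hinv
    obtain ⟨hne, h97, h122⟩ := hpre w (List.mem_cons_self)
    obtain ⟨ch, rest, hw⟩ : ∃ c r, w.toList = c :: r := by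
      cases hwl : w.toList with
      | nil => exact absurd hwl hne
      | cons c r => exact ⟨c, r, rfl⟩
    rw [hw, List.headD_cons] at h97 h122
    set i : Nat := ch.toNat - 97 with hi
    have hi26 : i < 26 := by omega
    have hstep : insertWord alph w = alph.set i (dfsN rest (alph.getD i dfltN)) := by
      have h0 : (0:Int) ≤ (ch.toNat : Int) - 97 := by omega
      have htn : ((ch.toNat : Int) - 97).toNat = i := by omega
      have hlt : (ch.toNat : Int) - 97 < (alph.length : Int) := by
        rw [hlen]; omega
      have hrange : PySem.Raise.InRange alph.length ((ch.toNat : Int) - 97) := by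
        constructor <;> omega
      simp only [insertWord, hw, if_pos hrange, PySem.List.pySetD, PySem.List.pySet?,
        PySem.List.pyGetD, PySem.List.pyGet?, PySem.List.pyIdx?, if_pos h0, if_pos hlt,
        htn, dfltN, List.getD]
      rfl
    have hlen' : (insertWord alph w).length = 26 := by rw [hstep, List.length_set, hlen]
    have hinv' : ∀ j, j < 26 →
        TrieInv ((insertWord alph w).getD j dfltN)
          (if j = i then rest :: B j else B j) := by
      intro j hj
      by_cases hji : j = i
      · have hgd : (insertWord alph w).getD j dfltN = dfsN rest (alph.getD j dfltN) := by
          rw [hstep, hji, List.getD, List.getElem?_set_self (by rw [hlen]; exact hji ▸ hj)]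
          rfl
        rw [hgd, if_pos hji]
        exact inv_dfs rest _ _ (hinv j hj)
      · have : (insertWord alph w).getD j dfltN = alph.getD j dfltN := by
          rw [hstep, List.getD, List.getElem?_set_ne (fun h => hji h.symm)]
          rfl
        rw [this, if_neg hji]
        exact hinv j hj
    obtain ⟨hl2, hi2⟩ := ih (insertWord alph w) (fun j => if j = i then rest :: B j else B j)
      hlen' (fun u hu => hpre u (List.mem_cons_of_mem _ hu)) hinv'
    refine ⟨by simpa [List.foldl_cons] using hl2, ?_⟩
    intro j hj
    have := hi2 j hj
    have hbk : rootB (((w :: tl).map String.toList).reverse) j ++ B j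
        = rootB ((tl.map String.toList).reverse) j ++ (if j = i then rest :: B j else B j) := by
      rw [List.map_cons, List.reverse_cons, rootB, List.filterMap_append, ← rootB, ← rootB, hw]
      by_cases hji : j = i
      · subst hji
        simp [rootB, hi]
      · have : ¬ (ch.toNat - 97 = j) := fun h => hji (by omega)
        simp [rootB, this, hji]
    rw [hbk]
    simpa [List.foldl_cons] using this

-- ---- B's scan equals the per-word steps ----
theorem bCount_aux (v : List Char) (d : Nat) :
    ∀ (l : List String) (s : Int),
    l.foldl (fun s u => if u.toList.take d = v.take d then s + 1 else s) s
      = s + ((msAt (l.map String.toList) d v).length : Int)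
  | [], s => by simp [msAt]
  | u :: l, s => by
    by_cases hc : u.toList.take d = v.take d <;>
      simp [List.foldl_cons, hc, msAt, bCount_aux v d l, add_assoc, add_comm]

theorem bCount_eq_length (words : List String) (v : List Char) (d : Nat) :
    bCount words v d = (((msAt (words.map String.toList) d v).length : Nat) : Int) := by
  simpa using bCount_aux v d words 0

theorem sel_msAt (ws : List (List Char)) (v : List Char) (d : Nat) (h : d < v.length) :
    sel (msAt ws d v) v[d] = msAt ws (d + 1) v := by
  rw [sel, msAt, List.filterMap_filterMap, msAt]
  refine List.filterMap_congr ?_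
  intro u _
  by_cases h1 : u.take d = v.take d
  · have hlu : d ≤ u.length := by
      have := congrArg List.length h1
      simp only [List.length_take] at this
      omega
    simp only [if_pos h1, Option.bind_some]
    cases hdrop : u.drop d with
    | nil =>
      have hud : u.length ≤ d := by
        have := congrArg List.length hdrop
        simp only [List.length_drop, List.length_nil] at this
        omega
      have : ¬ (u.take (d+1) = v.take (d+1)) := by
        intro hq
        have := congrArg List.length hq
        simp only [List.length_take] at this
        omega
      simp [this]
    | cons c' t' =>
      have hdu : d < u.length := by
        have := congrArg List.length hdrop
        simp only [List.length_drop, List.length_cons] at this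
        omega
      have hcons : u[d] :: u.drop (d+1) = c' :: t' := by
        rw [← hdrop, List.drop_eq_getElem_cons hdu]
      have hc' : u[d] = c' := (List.cons.injEq _ _ _ _ ▸ hcons).1
      have ht' : u.drop (d+1) = t' := (List.cons.injEq _ _ _ _ ▸ hcons).2
      have htu : u.take (d+1) = u.take d ++ [u[d]] := by
        rw [List.take_add_one, List.getElem?_eq_getElem hdu]
        rfl
      have htv : v.take (d+1) = v.take d ++ [v[d]] := by
        rw [List.take_add_one, List.getElem?_eq_getElem h]
        rfl
      by_cases he : c' = v[d]
      · have : u.take (d+1) = v.take (d+1) := by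
          rw [htu, htv, h1, hc', he]
        simp [he, this, ht']
      · have : ¬ (u.take (d+1) = v.take (d+1)) := by
          intro hq
          rw [htu, htv] at hq
          have := List.append_inj_right hq (by rw [h1])
          simp only [List.cons.injEq] at this
          exact he (hc' ▸ this.1)
        simp [he, this]
  · have : ¬ (u.take (d+1) = v.take (d+1)) := by
      intro hq
      have hq2 := congrArg (List.take d) hq
      rw [List.take_take, List.take_take] at hq2
      simp only [Nat.min_def] at hq2
      exact h1 (by simpa [Nat.le_succ, if_pos (Nat.le_succ d)] using hq2)
    simp [h1, this]

theorem ksAux_steps (words : List String) (v : List Char)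
    (hv : v ∈ words.map String.toList) :
    ∀ (k d : Nat), k = v.length - d → d ≤ v.length →
    ksAux words v (List.range' d k) = (d : Int) - 1 + steps (v.drop d) (msAt (words.map String.toList) d v) := by
  have hone : ∀ d : Nat, 1 ≤ (msAt (words.map String.toList) d v).length := by
    intro d
    have : v.drop d ∈ msAt (words.map String.toList) d v := by
      rw [msAt, List.mem_filterMap]
      exact ⟨v, hv, by simp⟩
    calc 1 ≤ 1 := le_refl 1
    _ ≤ (msAt (words.map String.toList) d v).length := List.length_pos_of_mem this
  intro k
  induction k with
  | zero =>
    intro d hk hd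
    have hdl : d = v.length := by omega
    subst hdl
    simp [ksAux, List.range', List.drop_length, steps]
  | succ k ihk =>
    intro d hk hd
    have hdlt : d < v.length := by omega
    rw [List.range'_succ]
    simp only [ksAux]
    rw [List.drop_eq_getElem_cons hdlt]
    by_cases hc : bCount words v d = 1
    · rw [if_pos hc]
      have hm1 : (msAt (words.map String.toList) d v).length = 1 := by
        have := bCount_eq_length words v d
        omega
      have : ¬ (1 < (msAt (words.map String.toList) d v).length) := by omega
      simp only [steps, if_neg this]
      push_cast
      ring
    · rw [if_neg hc]
      have hm2 : 1 < (msAt (words.map String.toList) d v).length := by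
        have := bCount_eq_length words v d
        have := hone d
        omega
      simp only [steps, if_pos hm2, sel_msAt _ _ _ hdlt]
      rw [ihk (d+1) (by omega) (by omega)]
      push_cast
      ring

theorem filterMap_eq_map_of_some {α β : Type} :
    ∀ (l : List α) (f : α → Option β) (g : α → β),
    (∀ a ∈ l, f a = some (g a)) → l.filterMap f = l.map g
  | [], _, _, _ => rfl
  | a :: l, f, g, h => by
    rw [List.filterMap_cons, h a List.mem_cons_self, List.map_cons,
      filterMap_eq_map_of_some l f g (fun x hx => h x (List.mem_cons_of_mem _ hx))]

theorem char_toNat_inj {c c' : Char} (h : c.toNat = c'.toNat) : c = c' := by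
  apply Char.ext
  apply UInt32.toNat_inj.mp
  exact h

-- ===== VERDICT (by name: the statement is the Claim_ definition above) =====
theorem solution_spec : Claim_equal_solution := by
  unfold Claim_equal_solution
  intro words _ hpre
  unfold Spec_solution
  simp only [solution]
  have halph0 : (List.range 26).foldl (fun l i => l ++ [PNode.mk (Char.ofNat (i + 97)) 0 .nil]) ([] : List PNode)
      = (List.range 26).map (fun i => PNode.mk (Char.ofNat (i + 97)) 0 .nil) := by
    simpa using PySem.List.foldl_append_singleton_eq_map
      (f := fun i => PNode.mk (Char.ofNat (i + 97)) 0 .nil) (List.range 26) ([] : List PNode)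
  rw [halph0]
  set alph0 : List PNode := (List.range 26).map (fun i => PNode.mk (Char.ofNat (i + 97)) 0 .nil) with halphdef
  have halen : alph0.length = 26 := by simp [halphdef]
  have hinit : ∀ j, j < 26 → TrieInv (alph0.getD j dfltN) [] := by
    intro j hj
    have : alph0.getD j dfltN = PNode.mk (Char.ofNat (j + 97)) 0 .nil := by
      rw [halphdef, List.getD, List.getElem?_map, List.getElem?_range hj]
      rfl
    rw [this]
    exact trieInv_empty_node _
  obtain ⟨hflen, hfinv⟩ := fold_inv words alph0 (fun _ => []) halen hpre hinit
  set ws' := words.map String.toList with hws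
  set rws' := ws'.reverse with hrws
  set alphF := words.foldl insertWord alph0 with halphF
  rw [PySem.List.foldl_add (List.range 26) (fun i => getCountN (alphF.getD i (.mk 'a' 0 .nil))) 0]
  have hfe : ∀ j ∈ List.range 26,
      getCountN (alphF.getD j (PNode.mk 'a' 0 PForest.nil))
        = (fun j => ((rootB rws' j).map (fun t => steps t (rootB rws' j))).sum) j := by
    intro j hj
    have h1 := hfinv j (List.mem_range.mp hj)
    rw [List.append_nil] at h1
    exact getCount_inv h1
  rw [List.map_congr_left hfe]
  have hbucketR : ∀ j : Nat, rootB rws' j = rws'.filterMap (fun a =>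
      (pickRoot a).bind (fun p => if p.1 = j then some p.2 else none)) := by
    intro j
    rw [rootB]
    congr 1
    funext w
    cases w <;> rfl
  have hmemw : ∀ a ∈ rws', ∃ w ∈ words, w.toList = a := by
    intro a ha
    rw [hrws, List.mem_reverse, hws] at ha
    obtain ⟨w, hw, rfl⟩ := List.mem_map.mp ha
    exact ⟨w, hw, rfl⟩
  have hcovR : ∀ a ∈ rws', ∀ p : Nat × List Char, pickRoot a = some p → p.1 ∈ List.range 26 := by
    intro a ha p hp
    obtain ⟨w, hw, hwa⟩ := hmemw a ha
    obtain ⟨hne, h97, h122⟩ := hpre w hw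
    cases a with
    | nil => cases hp
    | cons c t =>
      simp only [pickRoot, Option.some.injEq] at hp
      subst hp
      rw [hwa, List.headD_cons] at h97 h122
      exact List.mem_range.mpr (by omega)
  rw [regroup' (fun j g => steps g (rootB rws' j)) pickRoot (List.range 26)
    (List.nodup_range) rws' hcovR (rootB rws') hbucketR]
  have hfm : rws'.filterMap (fun a => (pickRoot a).map (fun p => steps p.2 (rootB rws' p.1)))
      = rws'.map (fun v => ksAux words v (List.range' 1 (v.length - 1))) := by
    refine filterMap_eq_map_of_some _ _ _ ?_
    intro v hv
    obtain ⟨w, hw, hwv⟩ := hmemw v hv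
    obtain ⟨hne, h97, h122⟩ := hpre w hw
    obtain ⟨c, t, rfl⟩ : ∃ c r, v = c :: r := by
      cases hvl : v with
      | nil => rw [hvl] at hwv; exact absurd hwv hne
      | cons c r => exact ⟨c, r, rfl⟩
    rw [hwv, List.headD_cons] at h97 h122
    simp only [pickRoot, Option.map_some]
    congr 1
    have hrev : rootB rws' (c.toNat - 97) = (rootB ws' (c.toNat - 97)).reverse := by
      rw [rootB, hrws, List.filterMap_reverse]
      rfl
    rw [hrev, steps_perm (List.reverse_perm _) t]
    have hmsat : rootB ws' (c.toNat - 97) = msAt ws' 1 (c :: t) := by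
      rw [rootB, msAt]
      refine List.filterMap_congr ?_
      intro u hu
      obtain ⟨wu, hwu, hwuu⟩ : ∃ w ∈ words, w.toList = u := by
        rw [hws] at hu
        obtain ⟨w', hw', rfl⟩ := List.mem_map.mp hu
        exact ⟨w', hw', rfl⟩
      obtain ⟨hne', h97', h122'⟩ := hpre wu hwu
      cases u with
      | nil => rw [hwuu] at hne'; exact absurd rfl (hwuu ▸ hne')
      | cons c' t' =>
        rw [hwuu, List.headD_cons] at h97' h122'
        have hiff : (c'.toNat - 97 = c.toNat - 97) ↔ ((c' :: t').take 1 = (c :: t).take 1) := by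
          constructor
          · intro h
            have : c'.toNat = c.toNat := by omega
            rw [char_toNat_inj this]
            simp
          · intro h
            simp only [List.take, List.cons.injEq] at h
            rw [h.1]
        show (if c'.toNat - 97 = c.toNat - 97 then some t' else none)
          = (if (c' :: t').take 1 = (c :: t).take 1 then some ((c' :: t').drop 1) else none)
        by_cases hcc : c'.toNat - 97 = c.toNat - 97
        · rw [if_pos hcc, if_pos (hiff.mp hcc)]
          rfl
        · rw [if_neg hcc, if_neg (fun h => hcc (hiff.mpr h))]
    rw [hmsat]
    have hks := ksAux_steps words (c :: t) (by rw [← hws, ← hwv]; exact List.mem_map_of_mem hw)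
      ((c :: t).length - 1) 1 rfl (by simp)
    rw [hks]
    simp [List.drop, hws]
  rw [hfm]
  have hsum : (rws'.map (fun v => ksAux words v (List.range' 1 (v.length - 1)))).sum
      = (ws'.map (fun v => ksAux words v (List.range' 1 (v.length - 1)))).sum := by
    rw [hrws, List.map_reverse, List.sum_reverse_int]
  rw [hsum, hws, List.map_map]
  simp only [solution_alt, zero_add]
  rfl
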